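-- pv_equiv track=rewrite | github.com/DREAM-ODA-OS/CloudfreeCoverage | dataset_processor.py | calc_overviews
-- ===== SOURCE A (Python) =====
-- def calc_overviews(inbase_band, baseshape):
--     """
--         calculates the required overviews for the GTiFF output file(s)
--     """
--         # for the overview pyramids
--     def_tilesize = [256, 256]
--
--         # calculate required overviews from the newly created product size
--     xsize = baseshape[1]
--     ysize = baseshape[0]
--     maxsize = None
--     tilesize = None
--
--          # uses max-extension as a starting point
--     if xsize > ysize:
--         maxsize = xsize
--         tilesize = def_tilesize[0]
--     else:
--         maxsize = ysize
--         tilesize = def_tilesize[1]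
--
--     overview_sizes = []
--     factor = 1
--     while (maxsize / 2) >= tilesize:
--         maxsize = maxsize / 2
--         factor = factor * 2
--         overview_sizes.append(factor)
--
--     overview_sizes.append(factor * 2)
--
--     return overview_sizes
-- ===== SOURCE B (Python) =====
-- def calc_overviews(inbase_band, baseshape):
--     """
--         calculates the required overviews for the GTiFF output file(s)
--     """
--     maxsize = max(baseshape[0], baseshape[1])
--     # closed form: the loop runs k times where k = floor(log2(maxsize/512)) + 1,
--     # computed exactly with integer bit_length; result is [2, 4, ..., 2**(k+1)]
--     k = (maxsize // 256).bit_length() - 1 if maxsize >= 512 else 0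
--     return [2 ** i for i in range(1, k + 2)]
-- ===== Notes on version B (the rewrite author's own statement) =====
-- stated objective: simpler
-- what changed: Replaces the halving while-loop by a closed-form iteration count k = (max(shape)//256).bit_length()-1 (clamped to 0 below 512) and builds the pyramid [2**i for i in range(1, k+2)] in one comprehension.
import Mathlib
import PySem

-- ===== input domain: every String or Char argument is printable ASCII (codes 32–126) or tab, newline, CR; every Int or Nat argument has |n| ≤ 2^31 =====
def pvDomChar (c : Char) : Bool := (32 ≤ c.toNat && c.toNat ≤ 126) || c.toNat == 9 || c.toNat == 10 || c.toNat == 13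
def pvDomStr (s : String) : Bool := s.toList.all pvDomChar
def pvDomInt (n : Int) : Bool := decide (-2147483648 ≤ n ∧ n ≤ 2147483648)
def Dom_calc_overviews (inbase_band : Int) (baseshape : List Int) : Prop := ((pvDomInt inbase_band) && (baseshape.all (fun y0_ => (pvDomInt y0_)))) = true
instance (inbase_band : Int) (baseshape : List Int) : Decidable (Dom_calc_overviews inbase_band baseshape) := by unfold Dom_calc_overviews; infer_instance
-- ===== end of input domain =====

-- B replaces A's halving while-loop by a closed-form iteration count from integer
-- bit_length and a single comprehension (objective: simpler).

-- ===== PORT A =====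
-- Python halves `maxsize` with float `/`; for |maxsize| ≤ 2^31 every quotient is an
-- exact float, and each comparison is `x/2 ≥ 256` with an integer bound, so
-- ⌊x/2⌋ ≥ 256 ↔ x/2 ≥ 256 and ⌊⌊x/2⌋/2⌋ = ⌊x/4⌋: modelling the halving with
-- floordiv is exact on the domain (maxsize itself is never returned).
def calcLoopA (maxsize factor : Int) (acc : List Int) : List Int :=
  if h : 256 ≤ PySem.Int.floordiv maxsize 2 then
    calcLoopA (PySem.Int.floordiv maxsize 2) (factor * 2) (acc ++ [factor * 2])
  else
    acc ++ [factor * 2]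
termination_by maxsize.toNat
decreasing_by
  rw [PySem.Int.le_floordiv_iff_mul_le (by omega)] at h
  rw [PySem.Int.floordiv_eq_ediv_of_pos (by omega)]
  omega

def calc_overviews (inbase_band : Int) (baseshape : List Int) : List Int :=
  match PySem.List.pyGet? baseshape 1, PySem.List.pyGet? baseshape 0 with
  | some xsize, some ysize =>
      -- def_tilesize = [256, 256]: both branches set tilesize = 256
      if xsize > ysize then calcLoopA xsize 1 []
      else calcLoopA ysize 1 []
  | _, _ => []   -- IndexError: excluded by Pre_

-- ===== PORT B =====
def calc_overviews_alt (inbase_band : Int) (baseshape : List Int) : List Int :=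
  match PySem.List.pyGet? baseshape 0 with
  | none => []   -- IndexError: excluded by Pre_
  | some a =>
    match PySem.List.pyGet? baseshape 1 with
    | none => []   -- IndexError: excluded by Pre_
    | some b =>
      let m := max a b
      let k : Int :=
        if 512 ≤ m then (PySem.Int.bitLength (PySem.Int.floordiv m 256) : Int) - 1 else 0
      (PySem.List.pyRange 1 (k + 2) 1).map (fun i => (2 : Int) ^ i.toNat)

-- ===== PRECONDITION & SPEC =====
-- A raises IndexError iff baseshape has fewer than two elements; nothing else raises.
def Pre_calc_overviews (inbase_band : Int) (baseshape : List Int) : Prop :=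
  2 ≤ baseshape.length
instance (inbase_band : Int) (baseshape : List Int) : Decidable (Pre_calc_overviews inbase_band baseshape) := by unfold Pre_calc_overviews; infer_instance
def pvWitness_calc_overviews : Int × List Int := (0, [300, 600])

def Spec_calc_overviews (inbase_band : Int) (baseshape : List Int) (out : List Int) : Prop := out = calc_overviews_alt inbase_band baseshape
instance (inbase_band : Int) (baseshape : List Int) (out : List Int) : Decidable (Spec_calc_overviews inbase_band baseshape out) := by unfold Spec_calc_overviews; infer_instance

-- ===== CLAIM (what is proved, stated in full; the proofs are below) =====
def Claim_equal_calc_overviews : Prop := ∀ (inbase_band : Int) (baseshape : List Int), Dom_calc_overviews inbase_band baseshape → Pre_calc_overviews inbase_band baseshape → Spec_calc_overviews inbase_band baseshape (calc_overviews inbase_band baseshape)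

-- ===== LEMMAS AND PROOFS =====

-- A's loop iteration count, as a Nat
def pvK (m : Int) : Nat :=
  if 512 ≤ m then PySem.Int.bitLength (PySem.Int.floordiv m 256) - 1 else 0

lemma pvBL_ge_two (m : Int) (h : 512 ≤ m) :
    2 ≤ PySem.Int.bitLength (PySem.Int.floordiv m 256) := by
  have h2 : 2 ≤ PySem.Int.floordiv m 256 := by
    rw [PySem.Int.le_floordiv_iff_mul_le (by omega)]; omega
  have h1 : 1 ≤ PySem.Int.floordiv (PySem.Int.floordiv m 256) 2 := by
    rw [PySem.Int.le_floordiv_iff_mul_le (by omega)]; omega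
  rw [PySem.Int.bitLength_of_pos (n := PySem.Int.floordiv m 256) (by omega),
      PySem.Int.bitLength_of_pos (n := PySem.Int.floordiv (PySem.Int.floordiv m 256) 2) (by omega)]
  omega

lemma pvDivSwap (m : Int) :
    PySem.Int.floordiv (PySem.Int.floordiv m 2) 256 = PySem.Int.floordiv (PySem.Int.floordiv m 256) 2 := by
  rw [PySem.Int.floordiv_eq_ediv_of_pos (a := m) (b := 2) (by omega),
      PySem.Int.floordiv_eq_ediv_of_pos (b := 256) (by omega),
      PySem.Int.floordiv_eq_ediv_of_pos (a := m) (b := 256) (by omega),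
      PySem.Int.floordiv_eq_ediv_of_pos (b := 2) (by omega)]
  omega

lemma pvK_step (m : Int) (h : 512 ≤ m) :
    pvK m = pvK (PySem.Int.floordiv m 2) + 1 := by
  have hm2 : 256 ≤ PySem.Int.floordiv m 2 := by
    rw [PySem.Int.le_floordiv_iff_mul_le (by omega)]; omega
  by_cases h5 : 512 ≤ PySem.Int.floordiv m 2
  · have hb := pvBL_ge_two _ h5
    have h2 : 2 ≤ PySem.Int.floordiv m 256 := by
      rw [PySem.Int.le_floordiv_iff_mul_le (by omega)]; omega
    simp only [pvK, if_pos h, if_pos h5]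
    rw [PySem.Int.bitLength_of_pos (n := PySem.Int.floordiv m 256) (by omega),
        ← pvDivSwap m]
    omega
  · -- 512 ≤ m < 1024: floordiv m 256 ∈ {2, 3}
    have hlt : m < 1024 := by
      by_contra hc
      exact h5 (by rw [PySem.Int.le_floordiv_iff_mul_le (by omega)]; omega)
    have : PySem.Int.floordiv m 256 = 2 ∨ PySem.Int.floordiv m 256 = 3 := by
      rw [PySem.Int.floordiv_eq_iff_of_pos (by omega), PySem.Int.floordiv_eq_iff_of_pos (by omega)]
      omega
    simp only [pvK, if_pos h, if_neg h5]
    rcases this with h2 | h2 <;> rw [h2] <;> decide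

lemma pvShift (f : Int) (n : Nat) :
    List.map (fun i => f * 2 ^ (i + 1)) (List.range (n + 1)) =
      f * 2 :: List.map (fun i => (f * 2) * 2 ^ (i + 1)) (List.range n) := by
  rw [List.range_succ_eq_map]
  simp only [List.map_cons, List.map_map, Function.comp_def]
  congr 1
  refine List.map_congr_left fun i _ => ?_
  simp [Nat.succ_eq_add_one]; ring

lemma calcLoopA_eq (m f : Int) (acc : List Int) :
    calcLoopA m f acc = acc ++ (List.range (pvK m + 1)).map (fun i => f * 2 ^ (i + 1)) := by
  fun_induction calcLoopA with
  | case1 m f acc h ih =>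
    have h512 : 512 ≤ m := by
      rw [PySem.Int.le_floordiv_iff_mul_le (by omega)] at h; omega
    rw [pvK_step m h512, pvShift f (pvK (PySem.Int.floordiv m 2) + 1), ih]
    simp
  | case2 m f acc h =>
    have h512 : ¬ 512 ≤ m := by
      rw [PySem.Int.le_floordiv_iff_mul_le (by omega)] at h; omega
    simp [pvK, h512]

lemma pvAlt_eq (m : Int) :
    (PySem.List.pyRange 1 ((if 512 ≤ m then (PySem.Int.bitLength (PySem.Int.floordiv m 256) : Int) - 1 else 0) + 2) 1).map
      (fun i => (2 : Int) ^ i.toNat)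
    = (List.range (pvK m + 1)).map (fun i => (1 : Int) * 2 ^ (i + 1)) := by
  have hk : (if 512 ≤ m then (PySem.Int.bitLength (PySem.Int.floordiv m 256) : Int) - 1 else 0) = (pvK m : Int) := by
    unfold pvK; split_ifs with h
    · have := pvBL_ge_two m h; omega
    · simp
  have hn : ((pvK m : Int) + 2 - 1).toNat = pvK m + 1 := by omega
  rw [hk, PySem.List.pyRange_one, hn]
  simp only [List.map_map, Function.comp_def]
  refine List.map_congr_left fun i _ => ?_
  have hi : ((1 : Int) + i).toNat = i + 1 := by omega
  rw [hi]; ring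

-- ===== VERDICT (by name: the statement is the Claim_ definition above) =====
theorem calc_overviews_spec : Claim_equal_calc_overviews := by
  intro inbase_band baseshape _ hpre
  unfold Pre_calc_overviews at hpre
  unfold Spec_calc_overviews
  have h1 : PySem.List.pyGet? baseshape 1 = some baseshape[1] := by
    rw [show (1 : Int) = ((1 : Nat) : Int) from rfl, PySem.List.pyGet?_natCast]
    simp [List.getElem?_eq_getElem]
  have h0 : PySem.List.pyGet? baseshape 0 = some baseshape[0] := by
    rw [show (0 : Int) = ((0 : Nat) : Int) from rfl, PySem.List.pyGet?_natCast]
    simp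
  unfold calc_overviews calc_overviews_alt
  rw [h0, h1]
  simp only
  by_cases hx : baseshape[1] > baseshape[0]
  · rw [if_pos hx, max_eq_right hx.le, calcLoopA_eq, pvAlt_eq]
    simp
  · rw [if_neg hx, max_eq_left (by omega), calcLoopA_eq, pvAlt_eq]
    simp
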